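-- pv_equiv track=rewrite | github.com/jeremy63s/Crackle-Gene | src/my_project/pipeline/__init__.py | divide_sequence_with_offset
-- ===== SOURCE A (Python) =====
-- def divide_sequence_with_offset(seq, n):
--     """
--     Divide the sequence into n sections and return a list of tuples (section, offset),
--     where offset is the starting index of that section in the full sequence.
--     """
--     if n <= 0:
--         raise ValueError("The number of sections must be positive.")
--     L = len(seq)
--     base = L // n
--     sections = []
--     for i in range(n - 1):
--         start = i * base
--         end = (i + 1) * base
--         sections.append((seq[start:end], start))
--     start = (n - 1) * base
--     sections.append((seq[start:], start))
--     return sections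
-- ===== SOURCE B (Python) =====
-- def divide_sequence_with_offset(seq, n):
--     """
--     Divide the sequence into n sections and return a list of tuples (section, offset),
--     where offset is the starting index of that section in the full sequence.
--     """
--     if n <= 0:
--         raise ValueError("The number of sections must be positive.")
--     base = len(seq) // n
--     sections = [[] for _ in range(n)]
--     # distribute the elements one by one into their buckets; everything past
--     # the first n-1 full buckets lands in the last one
--     for idx, x in enumerate(seq):
--         j = min(idx // base, n - 1) if base else n - 1
--         sections[j].append(x)
--     return [(sec, i * base) for i, sec in enumerate(sections)]
-- ===== Notes on version B (the rewrite author's own statement) =====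
-- stated objective: alternative
-- what changed: Replaces A's index-arithmetic slicing (slices of the original at computed bounds i*base..(i+1)*base plus a special-cased tail append) by a one-pass distribution: n empty buckets are created and each element is appended to bucket min(idx // base, n-1), so no slice is ever taken.
import Mathlib
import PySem

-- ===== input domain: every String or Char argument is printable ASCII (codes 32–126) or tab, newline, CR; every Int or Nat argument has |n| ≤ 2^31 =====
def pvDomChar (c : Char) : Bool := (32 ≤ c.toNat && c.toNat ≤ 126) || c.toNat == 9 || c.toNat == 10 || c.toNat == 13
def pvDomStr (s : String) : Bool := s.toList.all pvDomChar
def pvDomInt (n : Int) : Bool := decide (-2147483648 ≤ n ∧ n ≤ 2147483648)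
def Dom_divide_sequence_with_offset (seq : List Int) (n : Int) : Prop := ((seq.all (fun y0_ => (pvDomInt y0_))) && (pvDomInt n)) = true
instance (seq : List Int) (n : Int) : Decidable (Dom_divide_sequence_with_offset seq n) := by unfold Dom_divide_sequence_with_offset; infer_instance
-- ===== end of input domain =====

-- B replaces A's index-arithmetic slicing of the original by a one-pass distribution of the
-- elements into n buckets keyed by idx // base (objective: alternative).
-- Equality of return values is proved on Pre_ (0 < n); for n ≤ 0 both Pythons raise ValueError.

-- ===== PORT A =====
def divide_sequence_with_offset (seq : List Int) (n : Int) : List (List Int × Int) :=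
  let L : Int := seq.length
  let base := PySem.Int.floordiv L n
  let sections :=
    (PySem.List.pyRange 0 (n - 1)).foldl
      (fun acc i =>
        acc ++ [(PySem.List.slice seq (some (i * base)) (some ((i + 1) * base)), i * base)]) []
  sections ++ [(PySem.List.slice seq (some ((n - 1) * base)) none, (n - 1) * base)]

-- ===== PORT B =====
-- sections[j].append(x) is ported as set at j (j is a nonnegative index whenever 0 < n,
-- the only case Pre_ admits, so .toNat is exact there)
def divide_sequence_with_offset_alt (seq : List Int) (n : Int) : List (List Int × Int) :=
  let base := PySem.Int.floordiv (seq.length : Int) n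
  let sections0 : List (List Int) := (PySem.List.pyRange 0 n).map (fun _ => [])
  let sections :=
    (PySem.List.enumerate seq).foldl
      (fun secs p =>
        let j : Int := if base ≠ 0 then min (PySem.Int.floordiv p.1 base) (n - 1) else n - 1
        secs.set j.toNat ((secs.getD j.toNat []) ++ [p.2]))
      sections0
  (PySem.List.enumerate sections).map (fun p => (p.2, p.1 * base))

-- ===== PRECONDITION & SPEC =====
-- Pre_ excludes exactly n ≤ 0, where Python A raises ValueError (B raises identically).
def Pre_divide_sequence_with_offset (seq : List Int) (n : Int) : Prop := 0 < n
instance (seq : List Int) (n : Int) : Decidable (Pre_divide_sequence_with_offset seq n) := by unfold Pre_divide_sequence_with_offset; infer_instance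
def pvWitness_divide_sequence_with_offset : List Int × Int := ([1, 2, 3, 4, 5], 2)

def Spec_divide_sequence_with_offset (seq : List Int) (n : Int) (out : List (List Int × Int)) : Prop := out = divide_sequence_with_offset_alt seq n
instance (seq : List Int) (n : Int) (out : List (List Int × Int)) : Decidable (Spec_divide_sequence_with_offset seq n out) := by unfold Spec_divide_sequence_with_offset; infer_instance

-- ===== CLAIM =====
def Claim_equal_divide_sequence_with_offset : Prop := ∀ (seq : List Int) (n : Int), Dom_divide_sequence_with_offset seq n → Pre_divide_sequence_with_offset seq n → Spec_divide_sequence_with_offset seq n (divide_sequence_with_offset seq n)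

-- ===== LEMMAS AND PROOFS =====

-- the i-th of the m+1 sections, cut out of a prefix l of the sequence
def pvBucket (bn m : Nat) (l : List Int) (i : Nat) : List Int :=
  if i < m then (l.drop (i * bn)).take bn else l.drop (m * bn)

-- the bucket index element number t is sent to
def pvJ (bn m t : Nat) : Nat := if bn = 0 then m else min (t / bn) m

-- appending one element to the prefix extends exactly the bucket pvJ picks
theorem pvBucket_snoc (bn m : Nat) (ys : List Int) (y : Int) (i : Nat) (him : i ≤ m) :
    pvBucket bn m (ys ++ [y]) i
      = if i = pvJ bn m ys.length then pvBucket bn m ys i ++ [y] else pvBucket bn m ys i := by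
  rcases Nat.eq_zero_or_pos bn with hbz | hbp
  · subst hbz
    unfold pvBucket pvJ
    rcases Nat.lt_or_ge i m with him' | him'
    · simp only [him', if_true, Nat.mul_zero, List.take_zero]
      rw [if_neg (by omega)]
    · have : i = m := by omega
      subst this
      simp
  · have hq := Nat.div_add_mod' ys.length bn
    have hr : ys.length % bn < bn := Nat.mod_lt _ hbp
    have hqt : (ys.length / bn) * bn ≤ ys.length := Nat.div_mul_le_self _ _
    have hbz : ¬ bn = 0 := by omega
    unfold pvBucket pvJ
    simp only [hbz, if_false]
    rcases Nat.lt_or_ge i m with him' | him'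
    · -- a middle bucket
      simp only [him', if_true]
      rw [List.drop_append, List.take_append, List.length_drop]
      by_cases hij : i = min (ys.length / bn) m
      · -- the receiving bucket: i = ys.length / bn, the residue has room for y
        have hiq : i = ys.length / bn := by omega
        have h1 : i * bn + ys.length % bn = ys.length := by
          rw [hiq]; exact hq
        rw [if_pos hij]
        generalize hP : i * bn = P at h1 ⊢
        rw [show P - ys.length = 0 by omega, List.drop_zero,
          show bn - (ys.length - P) = (bn - ys.length % bn - 1) + 1 by omega]
        simp
      · rw [if_neg hij]
        rcases Nat.lt_or_ge i (ys.length / bn) with hlt | hge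
        · -- i below the receiving bucket: its bn elements are all in ys already
          have h1 : i * bn + bn ≤ ys.length := by
            have h2 : (i + 1) * bn ≤ (ys.length / bn) * bn :=
              Nat.mul_le_mul_right _ (by omega)
            rw [Nat.succ_mul] at h2
            omega
          generalize hP : i * bn = P at h1 ⊢
          rw [show P - ys.length = 0 by omega, List.drop_zero,
            show bn - (ys.length - P) = 0 by omega]
          simp
        · -- i above the receiving bucket: both sides are empty
          have hiq : ys.length / bn < i := by omega
          have h1 : ys.length < i * bn := by
            have h2 : (ys.length / bn + 1) * bn ≤ i * bn :=
              Nat.mul_le_mul_right _ (by omega)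
            rw [Nat.succ_mul] at h2
            omega
          generalize hP : i * bn = P at h1 ⊢
          rw [show P - ys.length = (P - ys.length - 1) + 1 by omega]
          rw [List.drop_eq_nil_of_le (show ys.length ≤ P by omega)]
          simp
    · -- the last bucket keeps the whole tail
      have him2 : i = m := by omega
      rw [him2]
      simp only [Nat.lt_irrefl, if_false]
      rw [List.drop_append]
      by_cases hjm : m = min (ys.length / bn) m
      · have h1 : m * bn ≤ ys.length := by
          have h2 : m * bn ≤ (ys.length / bn) * bn := Nat.mul_le_mul_right _ (by omega)
          omega
        rw [if_pos hjm]
        generalize hP : m * bn = P at h1 ⊢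
        rw [show P - ys.length = 0 by omega]
        simp
      · have h1 : ys.length < m * bn := by
          have h2 : (ys.length / bn + 1) * bn ≤ m * bn := Nat.mul_le_mul_right _ (by omega)
          rw [Nat.succ_mul] at h2
          omega
        rw [if_neg (by omega)]
        generalize hP : m * bn = P at h1 ⊢
        rw [show P - ys.length = (P - ys.length - 1) + 1 by omega,
          List.drop_eq_nil_of_le (show ys.length ≤ P by omega)]
        simp

-- the fold's update step, on the map-over-range representation of the buckets
theorem pvSet_buckets (bn m : Nat) (ys : List Int) (y : Int) :
    ((List.range (m + 1)).map (pvBucket bn m ys)).set (pvJ bn m ys.length)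
        (pvBucket bn m ys (pvJ bn m ys.length) ++ [y])
      = (List.range (m + 1)).map (pvBucket bn m (ys ++ [y])) := by
  apply List.ext_getElem
  · simp
  · intro k hk hk'
    have hkm : k < m + 1 := by simpa using hk'
    simp only [List.getElem_set, List.getElem_map, List.getElem_range]
    rw [pvBucket_snoc bn m ys y k (by omega)]
    by_cases hkj : pvJ bn m ys.length = k
    · simp [hkj]
    · rw [if_neg hkj, if_neg (fun h => hkj h.symm)]

-- the whole fold computes the buckets of the whole sequence
theorem pvFold_buckets (bn m : Nat) (ys : List Int) :
    (PySem.List.enumerate ys).foldl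
      (fun secs p =>
        secs.set ((if ((bn : Nat) : Int) ≠ 0 then
              min (PySem.Int.floordiv p.1 ((bn : Nat) : Int)) (((m + 1 : Nat) : Int) - 1)
            else ((m + 1 : Nat) : Int) - 1)).toNat
          ((secs.getD ((if ((bn : Nat) : Int) ≠ 0 then
              min (PySem.Int.floordiv p.1 ((bn : Nat) : Int)) (((m + 1 : Nat) : Int) - 1)
            else ((m + 1 : Nat) : Int) - 1)).toNat []) ++ [p.2]))
      ((List.range (m + 1)).map (fun _ => []))
      = (List.range (m + 1)).map (pvBucket bn m ys) := by
  induction ys using List.reverseRecOn with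
  | nil =>
      rw [show PySem.List.enumerate ([] : List Int) = [] from rfl]
      simp only [List.foldl_nil]
      apply List.map_congr_left
      intro i _
      unfold pvBucket
      split <;> simp
  | append_singleton ys y ih =>
      rw [PySem.List.enumerate_append, List.foldl_append, ih]
      rw [show PySem.List.enumerate [y] (0 + ys.length) = [((0 + ys.length : Int), y)] from rfl]
      simp only [List.foldl_cons, List.foldl_nil, zero_add]
      have hj : ((if ((bn : Nat) : Int) ≠ 0 then
            min (PySem.Int.floordiv ((ys.length : Nat) : Int) ((bn : Nat) : Int)) (((m + 1 : Nat) : Int) - 1)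
          else ((m + 1 : Nat) : Int) - 1)).toNat = pvJ bn m ys.length := by
        unfold pvJ
        by_cases hb : bn = 0
        · subst hb; simp
        · rw [if_pos (by exact_mod_cast hb), if_neg hb]
          rw [PySem.Int.floordiv_natCast]
          have hcast : ((m + 1 : Nat) : Int) - 1 = ((m : Nat) : Int) := by push_cast; ring
          rw [hcast, ← Nat.cast_min]
          exact Int.toNat_natCast _
      rw [hj]
      have hget : ((List.range (m + 1)).map (pvBucket bn m ys)).getD (pvJ bn m ys.length) []
          = pvBucket bn m ys (pvJ bn m ys.length) := by
        have hjlt : pvJ bn m ys.length < m + 1 := by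
          unfold pvJ
          split
          · omega
          · exact Nat.lt_succ_of_le (Nat.min_le_right _ _)
        rw [List.getD_eq_getElem?_getD, List.getElem?_map, List.getElem?_range hjlt]
        rfl
      rw [hget, pvSet_buckets]

-- reading the buckets back out with enumerate
theorem pvRead_buckets (bn m : Nat) (g : Nat → List Int) :
    (PySem.List.enumerate ((List.range (m + 1)).map g)).map
        (fun p => (p.2, p.1 * ((bn : Nat) : Int)))
      = (List.range (m + 1)).map (fun i => (g i, ((i : Nat) : Int) * ((bn : Nat) : Int))) := by
  apply List.ext_getElem
  · simp [PySem.List.length_enumerate]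
  · intro k hk hk'
    rw [List.getElem_map, PySem.List.getElem_enumerate, List.getElem_map, List.getElem_range,
      List.getElem_map, List.getElem_range]
    simp

-- ===== VERDICT =====
theorem divide_sequence_with_offset_spec : Claim_equal_divide_sequence_with_offset := by
  intro seq n _ hn
  have hn' : (0:Int) < n := hn
  obtain ⟨m, rfl⟩ : ∃ m : Nat, n = ((m + 1 : Nat) : Int) := ⟨n.toNat - 1, by omega⟩
  unfold Spec_divide_sequence_with_offset divide_sequence_with_offset divide_sequence_with_offset_alt
  dsimp only
  set base := PySem.Int.floordiv ((seq.length : Nat) : Int) (((m + 1 : Nat) : Nat) : Int) with hB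
  have hbase0 : 0 ≤ base := by
    rw [hB, PySem.Int.floordiv_eq_ediv_of_pos hn']
    exact Int.ediv_nonneg (by positivity) (le_of_lt hn')
  obtain ⟨bn, hbn⟩ : ∃ bn : Nat, base = (bn : Int) := ⟨base.toNat, by omega⟩
  rw [hbn]
  -- B side: pyRange 0 (m+1) of empty buckets, then the fold, then the read-out
  have hs0 : (PySem.List.pyRange 0 ((m + 1 : Nat) : Int)).map (fun _ => ([] : List Int))
      = (List.range (m + 1)).map (fun _ => []) := by
    rw [PySem.List.pyRange_zero_natCast (m + 1), List.map_map]
    apply List.map_congr_left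
    intro i _
    rfl
  rw [hs0, pvFold_buckets bn m seq, pvRead_buckets bn m (pvBucket bn m seq)]
  -- A side: closed form of the append loop, then range (m+1) = range m ++ [m]
  have hsub : ((m + 1 : Nat) : Int) - 1 = ((m : Nat) : Int) := by push_cast; ring
  rw [hsub, PySem.List.pyRange_zero_natCast m, PySem.List.foldl_append_singleton_eq_map]
  simp only [List.map_map, List.nil_append, Function.comp_def]
  rw [List.range_succ, List.map_append, List.map_singleton]
  congr 1
  · apply List.map_congr_left
    intro i hi
    have him : i < m := List.mem_range.mp hi
    have h1 : (i : Int) * (bn : Int) = ((i * bn : Nat) : Int) := by push_cast; ring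
    have h2 : ((i : Int) + 1) * (bn : Int) = ((i * bn : Nat) : Int) + ((bn : Nat) : Int) := by push_cast; ring
    rw [h1, h2, PySem.List.slice_natCast_add]
    unfold pvBucket
    rw [if_pos him]
  · have h1 : ((m : Nat) : Int) * (bn : Int) = ((m * bn : Nat) : Int) := by push_cast; ring
    rw [h1, PySem.List.slice_from_natCast]
    unfold pvBucket
    rw [if_neg (Nat.lt_irrefl m)]
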